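-- pv_equiv track=rewrite | github.com/AI-Colleagues/orcheo | packages/sdk/src/orcheo_sdk/cli/workflow/ingest.py | _strip_main_block
-- ===== SOURCE A (Python) =====
-- def _strip_main_block(script: str) -> str:
--     """Remove if __name__ == '__main__' blocks from Python scripts."""
--     lines = script.split("\n")
--     filtered_lines = []
--     for line in lines:
--         if line.strip().startswith('if __name__ == "__main__"'):
--             break
--         if line.strip().startswith("if __name__ == '__main__'"):
--             break
--         filtered_lines.append(line)
--     return "\n".join(filtered_lines)
-- ===== SOURCE B (Python) =====
-- def _is_guard(line):
--     stripped = line.strip()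
--     return (stripped.startswith('if __name__ == "__main__"')
--             or stripped.startswith("if __name__ == '__main__'"))
--
--
-- def _strip_main_block(script: str) -> str:
--     """Remove if __name__ == '__main__' blocks from Python scripts.
--
--     One-pass scan over the characters: track the start of the current line;
--     at each line end test the guard and, if found, return the slice of the
--     original script that precedes that line (no split/join, no list of lines).
--     """
--     line_start = 0
--     pos = 0
--     for ch in script:
--         if ch == "\n":
--             if _is_guard(script[line_start:pos]):
--                 return "" if line_start == 0 else script[:line_start - 1]
--             line_start = pos + 1
--         pos += 1
--     if _is_guard(script[line_start:]):
--         return "" if line_start == 0 else script[:line_start - 1]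
--     return script
-- ===== Notes on version B (the rewrite author's own statement) =====
-- stated objective: alternative
-- what changed: A splits the script into a fresh list of lines, filters them into an accumulator and joins them back; B does a single positional scan over the characters, tracking the start of the current line, and returns the original string unchanged or a slice of it before the first guard line, building no intermediate list.
import Mathlib
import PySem

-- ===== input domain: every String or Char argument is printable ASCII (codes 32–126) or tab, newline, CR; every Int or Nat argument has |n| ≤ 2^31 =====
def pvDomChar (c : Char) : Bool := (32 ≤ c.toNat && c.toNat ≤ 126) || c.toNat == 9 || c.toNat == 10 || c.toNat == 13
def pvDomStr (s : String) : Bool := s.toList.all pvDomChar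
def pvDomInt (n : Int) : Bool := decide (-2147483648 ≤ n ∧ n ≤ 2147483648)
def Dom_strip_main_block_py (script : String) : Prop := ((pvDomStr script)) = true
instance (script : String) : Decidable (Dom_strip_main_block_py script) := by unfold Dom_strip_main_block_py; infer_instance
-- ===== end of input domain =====

-- B replaces A's split/filter/join over a freshly built list of lines by a single positional
-- scan that returns the original string or a slice of it (alternative decomposition; not faster).

-- ===== PORT A =====
def pvG1 : List Char := "if __name__ == \"__main__\"".toList
def pvG2 : List Char := "if __name__ == '__main__'".toList

-- the 'for line in lines: … break … filtered_lines.append(line)' loop of A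
def pvALoop : List (List Char) → List (List Char) → List (List Char)
  | [], acc => acc
  | l :: ls, acc =>
    if PySem.Chars.startswith (PySem.Chars.strip l) pvG1 then acc
    else if PySem.Chars.startswith (PySem.Chars.strip l) pvG2 then acc
    else pvALoop ls (acc ++ [l])

-- script.split("\n") with the nonempty literal separator "\n" (PySem.Str.split? returns 'some' of exactly this)
def strip_main_block_py (script : String) : String :=
  String.ofList (PySem.Chars.join ['\n'] (pvALoop (PySem.Chars.splitOn script.toList ['\n']) []))

-- ===== PORT B =====
def pvIsGuard (line : List Char) : Bool :=
  let stripped := PySem.Chars.strip line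
  PySem.Chars.startswith stripped pvG1 || PySem.Chars.startswith stripped pvG2

-- B's 'for ch in script' loop: s is the whole script, rest the characters still to scan,
-- pos the index of the next character, lineStart the index where the current line begins
def pvBLoop (s : List Char) : List Char → Nat → Nat → List Char
  | [], _pos, lineStart =>
    if pvIsGuard (PySem.List.slice s (some (lineStart : Int)) none) then
      (if lineStart = 0 then [] else PySem.List.slice s none (some ((lineStart : Int) - 1)))
    else s
  | ch :: rest, pos, lineStart =>
    if ch = '\n' then
      if pvIsGuard (PySem.List.slice s (some (lineStart : Int)) (some (pos : Int))) then
        (if lineStart = 0 then [] else PySem.List.slice s none (some ((lineStart : Int) - 1)))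
      else pvBLoop s rest (pos + 1) (pos + 1)
    else pvBLoop s rest (pos + 1) lineStart

def strip_main_block_py_alt (script : String) : String :=
  String.ofList (pvBLoop script.toList script.toList 0 0)

-- ===== PRECONDITION & SPEC =====
def Spec_strip_main_block_py (script : String) (out : String) : Prop := out = strip_main_block_py_alt script
instance (script : String) (out : String) : Decidable (Spec_strip_main_block_py script out) := by unfold Spec_strip_main_block_py; infer_instance

-- ===== CLAIM (what is proved, stated in full; the proofs are below) =====
def Claim_equal_strip_main_block_py : Prop := ∀ (script : String), Dom_strip_main_block_py script → Spec_strip_main_block_py script (strip_main_block_py script)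

-- ===== LEMMAS AND PROOFS =====

-- reference splitter: what Chars.splitOn computes for the one-character separator '\n'
def pvSplit : List Char → List (List Char)
  | [] => [[]]
  | c :: r =>
    if c = '\n' then [] :: pvSplit r
    else
      match pvSplit r with
      | [] => [[c]]
      | p :: ps => (c :: p) :: ps

theorem pvSplit_ne_nil (l : List Char) : pvSplit l ≠ [] := by
  cases l with
  | nil => simp [pvSplit]
  | cons c r => simp only [pvSplit]; split_ifs <;> simp; split <;> simp

theorem pvGo_eq (fuel : Nat) (l cur : List Char) (acc : List (List Char))
    (h : l.length ≤ fuel) :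
    PySem.Chars.splitOn.go ['\n'] fuel l cur acc
      = acc.reverse ++ (pvSplit l).modifyHead (cur.reverse ++ ·) := by
  induction fuel generalizing l cur acc with
  | zero =>
    have : l = [] := by cases l <;> simp_all
    subst this
    simp [PySem.Chars.splitOn.go, pvSplit]
  | succ fuel ih =>
    cases l with
    | nil => simp [PySem.Chars.splitOn.go, pvSplit]
    | cons c rest =>
      simp only [PySem.Chars.splitOn.go]
      by_cases hc : c = '\n'
      · subst hc
        rw [if_pos (by simp)]
        simp only [List.length_singleton, List.drop_succ_cons, List.drop_zero]
        rw [ih rest [] (cur.reverse :: acc) (by simpa using Nat.le_of_succ_le_succ (by simpa using h))]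
        cases hps : pvSplit rest with
        | nil => exact absurd hps (pvSplit_ne_nil rest)
        | cons p ps => simp [pvSplit, hps]
      · rw [if_neg (by simp [Ne.symm hc])]
        rw [ih rest (c :: cur) acc (by simpa using Nat.le_of_succ_le_succ (by simpa using h))]
        simp only [pvSplit, if_neg hc]
        cases hps : pvSplit rest with
        | nil => exact absurd hps (pvSplit_ne_nil rest)
        | cons p ps => simp

theorem pvSplitOn_eq (s : List Char) : PySem.Chars.splitOn s ['\n'] = pvSplit s := by
  unfold PySem.Chars.splitOn
  rw [pvGo_eq _ _ _ _ (by omega)]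
  cases hps : pvSplit s with
  | nil => exact absurd hps (pvSplit_ne_nil s)
  | cons p ps => simp

theorem pvSplit_no_nl (l : List Char) (h : '\n' ∉ l) : pvSplit l = [l] := by
  induction l with
  | nil => simp [pvSplit]
  | cons c r ih =>
    simp only [List.mem_cons, not_or] at h
    simp [pvSplit, Ne.symm h.1, ih h.2]

theorem pvSplit_append_nl (l r : List Char) (h : '\n' ∉ l) :
    pvSplit (l ++ '\n' :: r) = l :: pvSplit r := by
  induction l with
  | nil => simp [pvSplit]
  | cons c t ih =>
    simp only [List.mem_cons, not_or] at h
    simp [pvSplit, Ne.symm h.1, ih h.2]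

-- the already-kept prefix of the script: every processed line followed by its '\n'
def pvJ (acc : List (List Char)) : List Char := (acc.map (· ++ ['\n'])).flatten

theorem pvJ_snoc (acc : List (List Char)) (c : List Char) :
    pvJ (acc ++ [c]) = pvJ acc ++ c ++ ['\n'] := by
  simp [pvJ]

theorem pvIntercalate_cons_cons (a b : List Char) (u : List (List Char)) (s : List Char) :
    s.intercalate (a :: b :: u) = a ++ s ++ s.intercalate (b :: u) := by
  simp [List.intercalate]

theorem pvIntercalate_snoc (acc : List (List Char)) (c : List Char) :
    ['\n'].intercalate (acc ++ [c])
      = if acc = [] then c else ['\n'].intercalate acc ++ '\n' :: c := by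
  induction acc with
  | nil => simp [List.intercalate]
  | cons a t ih =>
    cases t with
    | nil => simp [List.intercalate]
    | cons b u =>
      rw [show a :: b :: u ++ [c] = a :: b :: (u ++ [c]) by simp,
        pvIntercalate_cons_cons,
        show b :: (u ++ [c]) = b :: u ++ [c] by simp, ih,
        pvIntercalate_cons_cons]
      simp

theorem pvJ_eq_intercalate (acc : List (List Char)) (h : acc ≠ []) :
    pvJ acc = ['\n'].intercalate acc ++ ['\n'] := by
  induction acc with
  | nil => simp at h
  | cons a t ih =>
    cases t with
    | nil => simp [pvJ, List.intercalate]
    | cons b u =>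
      have h2 := ih (by simp)
      rw [pvIntercalate_cons_cons]
      simp [pvJ] at h2 ⊢
      simp [h2]

theorem pvALoop_cons (l : List Char) (ls acc : List (List Char)) :
    pvALoop (l :: ls) acc = if pvIsGuard l then acc else pvALoop ls (acc ++ [l]) := by
  simp only [pvALoop, pvIsGuard, Bool.or_eq_true]
  split_ifs with h1 h2 h3 h3 <;> simp_all

-- B's cut result when the guard line starts at (pvJ acc).length
theorem pvCut (acc : List (List Char)) (tail : List Char) :
    (if (pvJ acc).length = 0 then ([] : List Char)
     else PySem.List.slice (pvJ acc ++ tail) none (some (((pvJ acc).length : Int) - 1)))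
      = ['\n'].intercalate acc := by
  by_cases ha : acc = []
  · subst ha; simp [pvJ, List.intercalate]
  · have hJ := pvJ_eq_intercalate acc ha
    have hlen : (pvJ acc).length = (['\n'].intercalate acc).length + 1 := by
      rw [hJ]; simp
    rw [if_neg (by omega)]
    have hcast : (((pvJ acc).length : Int) - 1) = (((['\n'].intercalate acc).length : Nat) : Int) := by
      rw [hlen]; push_cast; ring
    rw [hcast, PySem.List.slice_to_natCast]
    rw [hJ, List.append_assoc, List.take_left]

-- the heart: B's scan, mid-line, equals A's remaining line loop
theorem pvMain (r : List Char) : ∀ (cur : List Char) (acc : List (List Char)), '\n' ∉ cur →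
    pvBLoop (pvJ acc ++ cur ++ r) r (pvJ acc ++ cur).length (pvJ acc).length
      = PySem.Chars.join ['\n'] (pvALoop (pvSplit (cur ++ r)) acc) := by
  induction r with
  | nil =>
    intro cur acc hcur
    simp only [pvBLoop]
    rw [PySem.List.slice_from_natCast]
    rw [show pvJ acc ++ cur ++ [] = pvJ acc ++ cur by simp, List.drop_left]
    rw [List.append_nil, pvSplit_no_nl cur hcur, pvALoop_cons]
    by_cases hg : pvIsGuard cur = true
    · rw [if_pos hg, if_pos hg]
      rw [pvCut acc cur]
      by_cases ha : acc = []
      · subst ha; simp [PySem.Chars.join, List.intercalate]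
      · simp [PySem.Chars.join]
    · rw [if_neg hg, if_neg hg]
      simp only [pvALoop]
      rw [PySem.Chars.join, pvIntercalate_snoc]
      by_cases ha : acc = []
      · subst ha; simp [pvJ]
      · rw [if_neg ha, pvJ_eq_intercalate acc ha]; simp
  | cons c r' ih =>
    intro cur acc hcur
    simp only [pvBLoop]
    by_cases hc : c = '\n'
    · subst hc
      rw [if_pos rfl]
      rw [PySem.List.slice_natCast]
      have hdrop : (pvJ acc ++ cur ++ '\n' :: r').drop (pvJ acc).length = cur ++ '\n' :: r' := by
        rw [List.append_assoc, List.drop_left]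
      have hsub : (pvJ acc ++ cur).length - (pvJ acc).length = cur.length := by
        simp
      rw [hdrop, hsub, List.take_left]
      rw [pvSplit_append_nl cur r' hcur, pvALoop_cons]
      by_cases hg : pvIsGuard cur = true
      · rw [if_pos hg, if_pos hg,
          show pvJ acc ++ cur ++ '\n' :: r' = pvJ acc ++ (cur ++ '\n' :: r') by simp,
          pvCut acc (cur ++ '\n' :: r')]
        by_cases ha : acc = []
        · subst ha; simp [PySem.Chars.join, List.intercalate]
        · simp [PySem.Chars.join]
      · rw [if_neg hg, if_neg hg]
        have heq : pvJ acc ++ cur ++ '\n' :: r' = pvJ (acc ++ [cur]) ++ [] ++ r' := by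
          rw [pvJ_snoc]; simp
        have hlen1 : (pvJ acc ++ cur).length + 1 = (pvJ (acc ++ [cur]) ++ []).length := by
          rw [pvJ_snoc]; simp; omega
        rw [heq, hlen1]
        have h5 := ih [] (acc ++ [cur]) (by simp)
        simp only [List.append_nil, List.nil_append] at h5 ⊢
        rw [h5]
    · rw [if_neg hc]
      have heq : pvJ acc ++ cur ++ c :: r' = pvJ acc ++ (cur ++ [c]) ++ r' := by simp
      have hlen : (pvJ acc ++ cur).length + 1 = (pvJ acc ++ (cur ++ [c])).length := by
        simp; omega
      rw [heq, hlen, ih (cur ++ [c]) acc (by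
        intro h
        rcases List.mem_append.mp h with h | h
        · exact hcur h
        · simp at h; exact hc h.symm)]
      simp

-- ===== VERDICT (by name: the statement is the Claim_ definition above) =====
theorem strip_main_block_py_spec : Claim_equal_strip_main_block_py := by
  intro script _
  show _ = _
  unfold strip_main_block_py strip_main_block_py_alt
  rw [pvSplitOn_eq]
  have := pvMain script.toList [] [] (by simp)
  simp [pvJ] at this
  rw [← this]
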